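-- pv_equiv track=rewrite | github.com/xleshing/Algorithm | Scheduling Problem/SFC Problem/Greedy/main.py | non_dominated_insert
-- ===== SOURCE A (Python) =====
-- def is_dominated(objA, objB):
--     """
--     A_dom_B = True 代表 A 支配 B (三目標都 <= 且至少一個 <)
--     這裡的目標越小越好
--     """
--     A_dom_B = (all(a <= b for a, b in zip(objA, objB)) and any(a < b for a, b in zip(objA, objB)))
--     B_dom_A = (all(b <= a for a, b in zip(objA, objB)) and any(b < a for a, b in zip(objA, objB)))
--     return A_dom_B, B_dom_A
--
-- def non_dominated_insert(front, new_sol, new_obj):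
--     dominated_by_others = False
--     dominates_list = []
--     for (sol, obj) in front:
--         A_dom_B, B_dom_A = is_dominated(new_obj, obj)
--         if B_dom_A:
--             # 代表 front 中的解支配 new_sol => 丟棄
--             dominated_by_others = True
--             break
--         if A_dom_B:
--             # new_sol 支配 front 中的 (sol, obj) => 之後要移除
--             dominates_list.append((sol, obj))
--     if dominated_by_others:
--         return front  # 丟棄 new_sol
--
--     # 移除被 new_sol 支配的
--     updated = []
--     for item in front:
--         if item not in dominates_list:
--             updated.append(item)
--     # 加入 new_sol
--     updated.append((new_sol, new_obj))
--     return updated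
-- ===== SOURCE B (Python) =====
-- def non_dominated_insert(front, new_sol, new_obj):
--     # Single pass: compare objective vectors once, keep non-dominated items directly,
--     # with no dominates_list and no membership-scan second pass.
--     updated = []
--     for sol, obj in front:
--         some_lt = some_gt = False
--         for a, b in zip(new_obj, obj):
--             if a < b:
--                 some_lt = True
--             elif b < a:
--                 some_gt = True
--         if some_gt and not some_lt:      # existing solution dominates the new one: discard it
--             return front
--         if some_gt or not some_lt:       # new solution does not dominate this item: keep it
--             updated.append((sol, obj))
--     updated.append((new_sol, new_obj))
--     return updated
-- ===== Notes on version B (the rewrite author's own statement) =====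
-- stated objective: alternative
-- what changed: B decides keep/discard for each front item in one pass from comparison flags computed inline, eliminating A's dominates_list and its membership-scan second pass; it trades A's C-level all/any/in built-ins for explicit flag loops, so the measured speed is similar.
import Mathlib
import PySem

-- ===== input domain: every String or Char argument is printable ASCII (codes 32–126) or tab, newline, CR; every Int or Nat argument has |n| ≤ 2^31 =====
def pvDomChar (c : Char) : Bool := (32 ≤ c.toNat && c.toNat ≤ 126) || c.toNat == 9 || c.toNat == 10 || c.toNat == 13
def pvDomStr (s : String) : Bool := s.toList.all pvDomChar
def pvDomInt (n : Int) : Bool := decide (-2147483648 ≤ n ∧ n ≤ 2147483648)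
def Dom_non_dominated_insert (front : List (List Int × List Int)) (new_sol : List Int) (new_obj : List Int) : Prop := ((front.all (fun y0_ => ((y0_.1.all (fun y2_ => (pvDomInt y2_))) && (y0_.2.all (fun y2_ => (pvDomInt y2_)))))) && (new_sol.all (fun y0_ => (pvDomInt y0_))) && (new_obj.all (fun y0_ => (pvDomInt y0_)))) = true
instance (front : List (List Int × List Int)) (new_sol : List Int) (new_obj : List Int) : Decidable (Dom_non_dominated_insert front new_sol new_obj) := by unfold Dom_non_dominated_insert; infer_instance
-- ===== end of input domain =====

-- B replaces A's dominates_list + membership-scan rebuild by a single pass that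
-- keeps each non-dominated item directly (objective: alternative).


-- ===== PORT A =====
-- is_dominated(objA, objB): (A dominates B, B dominates A), minimizing objectives
def is_dominated (objA objB : List Int) : Bool × Bool :=
  (((objA.zip objB).all fun p => decide (p.1 ≤ p.2)) && ((objA.zip objB).any fun p => decide (p.1 < p.2)),
   ((objA.zip objB).all fun p => decide (p.2 ≤ p.1)) && ((objA.zip objB).any fun p => decide (p.2 < p.1)))

-- first loop of A: returns (dominated_by_others, dominates_list); 'break' = stop recursing
def ndiLoop (new_obj : List Int) : List (List Int × List Int) → Bool × List (List Int × List Int)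
  | [] => (false, [])
  | (sol, obj) :: rest =>
    let d := is_dominated new_obj obj
    if d.2 then (true, [])
    else
      let r := ndiLoop new_obj rest
      (r.1, if d.1 then (sol, obj) :: r.2 else r.2)

def non_dominated_insert (front : List (List Int × List Int)) (new_sol : List Int) (new_obj : List Int) : List (List Int × List Int) :=
  let r := ndiLoop new_obj front
  if r.1 then front
  else
    -- second loop: updated = [item for item in front if item not in dominates_list]
    (front.foldl (fun acc item => if ¬ (item ∈ r.2) then acc ++ [item] else acc) []) ++ [(new_sol, new_obj)]

-- ===== PORT B =====
-- inner flag loop of B: (some_lt, some_gt) over zip new_obj obj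
def pvFlags (objA objB : List Int) : Bool × Bool :=
  (objA.zip objB).foldl
    (fun s p => if p.1 < p.2 then (true, s.2) else if p.2 < p.1 then (s.1, true) else s)
    (false, false)

def ndiAltGo (front0 : List (List Int × List Int)) (new_sol new_obj : List Int) :
    List (List Int × List Int) → List (List Int × List Int) → List (List Int × List Int)
  | [], updated => updated ++ [(new_sol, new_obj)]
  | (sol, obj) :: rest, updated =>
    let f := pvFlags new_obj obj
    if f.2 && !f.1 then front0
    else if f.2 || !f.1 then ndiAltGo front0 new_sol new_obj rest (updated ++ [(sol, obj)])
    else ndiAltGo front0 new_sol new_obj rest updated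

def non_dominated_insert_alt (front : List (List Int × List Int)) (new_sol : List Int) (new_obj : List Int) : List (List Int × List Int) :=
  ndiAltGo front new_sol new_obj front []

-- ===== PRECONDITION & SPEC =====
def Spec_non_dominated_insert (front : List (List Int × List Int)) (new_sol : List Int) (new_obj : List Int) (out : List (List Int × List Int)) : Prop := out = non_dominated_insert_alt front new_sol new_obj
instance (front : List (List Int × List Int)) (new_sol : List Int) (new_obj : List Int) (out : List (List Int × List Int)) : Decidable (Spec_non_dominated_insert front new_sol new_obj out) := by unfold Spec_non_dominated_insert; infer_instance

-- ===== CLAIM (what is proved, stated in full; the proofs are below) =====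
def Claim_equal_non_dominated_insert : Prop := ∀ (front : List (List Int × List Int)) (new_sol : List Int) (new_obj : List Int), Dom_non_dominated_insert front new_sol new_obj → Spec_non_dominated_insert front new_sol new_obj (non_dominated_insert front new_sol new_obj)

-- ===== LEMMAS AND PROOFS =====

-- shorthands for the two domination tests, phrased via 'any'
def pvSL (new_obj obj : List Int) : Bool := (new_obj.zip obj).any fun p => decide (p.1 < p.2)
def pvSG (new_obj obj : List Int) : Bool := (new_obj.zip obj).any fun p => decide (p.2 < p.1)

theorem pvFlags_aux :
    ∀ (l : List (Int × Int)) (s : Bool × Bool),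
      l.foldl (fun s p => if p.1 < p.2 then (true, s.2) else if p.2 < p.1 then (s.1, true) else s) s
        = (s.1 || l.any (fun p => decide (p.1 < p.2)), s.2 || l.any (fun p => decide (p.2 < p.1))) := by
  intro l
  induction l with
  | nil => intro s; simp
  | cons p rest ih =>
    intro s
    simp only [List.foldl_cons, List.any_cons]
    by_cases h1 : p.1 < p.2
    · simp [h1, ih, show ¬ p.2 < p.1 by omega]
    · by_cases h2 : p.2 < p.1
      · simp [h1, h2, ih]
      · simp [h1, h2, ih]

theorem pvFlags_eq (new_obj obj : List Int) :
    pvFlags new_obj obj = (pvSL new_obj obj, pvSG new_obj obj) := by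
  simp [pvFlags, pvSL, pvSG, pvFlags_aux]

theorem is_dominated_eq (new_obj obj : List Int) :
    is_dominated new_obj obj = (!pvSG new_obj obj && pvSL new_obj obj, !pvSL new_obj obj && pvSG new_obj obj) := by
  have hall1 : ((new_obj.zip obj).all fun p => decide (p.1 ≤ p.2)) = !pvSG new_obj obj := by
    have hf : ∀ p : Int × Int, (!decide (p.1 ≤ p.2)) = decide (p.2 < p.1) := by
      intro p; by_cases h : p.1 ≤ p.2
      · simp [h, show ¬ p.2 < p.1 by omega]
      · simp [h, show p.2 < p.1 by omega]
    simp only [pvSG, List.all_eq_not_any_not, hf]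
  have hall2 : ((new_obj.zip obj).all fun p => decide (p.2 ≤ p.1)) = !pvSL new_obj obj := by
    have hf : ∀ p : Int × Int, (!decide (p.2 ≤ p.1)) = decide (p.1 < p.2) := by
      intro p; by_cases h : p.2 ≤ p.1
      · simp [h, show ¬ p.1 < p.2 by omega]
      · simp [h, show p.1 < p.2 by omega]
    simp only [pvSL, List.all_eq_not_any_not, hf]
  simp [is_dominated, hall1, hall2, pvSL, pvSG, Bool.and_comm]

-- A's first loop when no front element dominates the new solution
theorem ndiLoop_none (new_obj : List Int) (l : List (List Int × List Int))
    (h : ∀ x ∈ l, (!pvSL new_obj x.2 && pvSG new_obj x.2) = false) :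
    ndiLoop new_obj l = (false, l.filter fun x => !pvSG new_obj x.2 && pvSL new_obj x.2) := by
  induction l with
  | nil => simp [ndiLoop]
  | cons x rest ih =>
    obtain ⟨sol, obj⟩ := x
    have hx := h (sol, obj) (by simp)
    simp only [ndiLoop, is_dominated_eq]
    rw [ih (fun y hy => h y (List.mem_cons_of_mem _ hy))]
    simp only [List.filter_cons]
    simp [hx]

-- A's first loop when some front element dominates the new solution
theorem ndiLoop_some (new_obj : List Int) (l : List (List Int × List Int))
    (h : ∃ x ∈ l, (!pvSL new_obj x.2 && pvSG new_obj x.2) = true) :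
    (ndiLoop new_obj l).1 = true := by
  induction l with
  | nil => simp at h
  | cons x rest ih =>
    obtain ⟨sol, obj⟩ := x
    simp only [ndiLoop, is_dominated_eq]
    by_cases hx : (!pvSL new_obj obj && pvSG new_obj obj) = true
    · simp [hx]
    · simp only [List.mem_cons] at h
      obtain ⟨y, hy, hyd⟩ := h
      rcases hy with rfl | hy
      · exact absurd hyd hx
      · simp [hx, ih ⟨y, hy, hyd⟩]

-- B's loop when no front element dominates the new solution
theorem ndiAltGo_none (front0 : List (List Int × List Int)) (new_sol new_obj : List Int)
    (l : List (List Int × List Int))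
    (h : ∀ x ∈ l, (!pvSL new_obj x.2 && pvSG new_obj x.2) = false) :
    ∀ acc, ndiAltGo front0 new_sol new_obj l acc
      = acc ++ (l.filter fun x => !(!pvSG new_obj x.2 && pvSL new_obj x.2)) ++ [(new_sol, new_obj)] := by
  induction l with
  | nil => intro acc; simp [ndiAltGo]
  | cons x rest ih =>
    intro acc
    obtain ⟨sol, obj⟩ := x
    have hx := h (sol, obj) (by simp)
    have ih' := ih (fun y hy => h y (List.mem_cons_of_mem _ hy))
    simp only [ndiAltGo, pvFlags_eq]
    simp only at hx
    have hd : (pvSG new_obj obj && !pvSL new_obj obj) = false := by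
      cases hsg : pvSG new_obj obj <;> cases hsl : pvSL new_obj obj <;> simp_all
    rw [if_neg (by simp [hd])]
    by_cases hk : (pvSG new_obj obj || !pvSL new_obj obj) = true
    · rw [if_pos hk, ih']
      have hthis : (!(!pvSG new_obj obj && pvSL new_obj obj)) = true := by
        cases hsg : pvSG new_obj obj <;> cases hsl : pvSL new_obj obj <;> simp_all
      rw [List.filter_cons, if_pos hthis]
      simp
    · rw [if_neg hk, ih']
      have hthis : (!(!pvSG new_obj obj && pvSL new_obj obj)) = false := by
        cases hsg : pvSG new_obj obj <;> cases hsl : pvSL new_obj obj <;> simp_all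
      rw [List.filter_cons, if_neg (by simp [hthis])]

-- B's loop when some front element dominates the new solution
theorem ndiAltGo_some (front0 : List (List Int × List Int)) (new_sol new_obj : List Int)
    (l : List (List Int × List Int))
    (h : ∃ x ∈ l, (!pvSL new_obj x.2 && pvSG new_obj x.2) = true) :
    ∀ acc, ndiAltGo front0 new_sol new_obj l acc = front0 := by
  induction l with
  | nil => simp at h
  | cons x rest ih =>
    intro acc
    obtain ⟨sol, obj⟩ := x
    simp only [ndiAltGo, pvFlags_eq]
    by_cases hx : (!pvSL new_obj obj && pvSG new_obj obj) = true
    · have : (pvSG new_obj obj && !pvSL new_obj obj) = true := by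
        cases hsg : pvSG new_obj obj <;> cases hsl : pvSL new_obj obj <;> simp_all
      simp [this]
    · simp only [List.mem_cons] at h
      obtain ⟨y, hy, hyd⟩ := h
      rcases hy with rfl | hy
      · exact absurd hyd hx
      · have hd : (pvSG new_obj obj && !pvSL new_obj obj) = false := by
          cases hsg : pvSG new_obj obj <;> cases hsl : pvSL new_obj obj <;> simp_all
        rw [if_neg (by simp [hd])]
        split <;> exact ih ⟨y, hy, hyd⟩ _

theorem main_eq (front : List (List Int × List Int)) (new_sol new_obj : List Int) :
    non_dominated_insert front new_sol new_obj = non_dominated_insert_alt front new_sol new_obj := by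
  by_cases h : ∃ x ∈ front, (!pvSL new_obj x.2 && pvSG new_obj x.2) = true
  · unfold non_dominated_insert non_dominated_insert_alt
    rw [ndiAltGo_some front new_sol new_obj front h []]
    simp [ndiLoop_some new_obj front h]
  · push Not at h
    have h' : ∀ x ∈ front, (!pvSL new_obj x.2 && pvSG new_obj x.2) = false := by
      intro x hx; exact Bool.eq_false_iff.mpr (h x hx)
    unfold non_dominated_insert non_dominated_insert_alt
    rw [ndiAltGo_none front new_sol new_obj front h' [], ndiLoop_none new_obj front h']
    simp only [Bool.false_eq_true, if_false, List.nil_append]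
    congr 1
    rw [PySem.List.foldl_append_ite_eq_filter]
    simp only [List.nil_append]
    apply List.filter_congr
    intro x hx
    simp [List.mem_filter, hx]

-- ===== VERDICT (by name: the statement is the Claim_ definition above) =====
theorem non_dominated_insert_spec : Claim_equal_non_dominated_insert := by
  intro front new_sol new_obj _
  exact main_eq front new_sol new_obj
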